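-- pv_equiv track=rewrite | github.com/nysol/nysol_python | nysol/mining/mspade.py | pat2arr
-- ===== SOURCE A (Python) =====
-- def pat2arr(pat):
-- 	s=[]
-- 	ss=[]
-- 	for ele in pat:
-- 		if ele==0:
-- 			ss=[]
-- 		elif ele==1:
-- 			s.append(ss)
-- 			ss=[]
-- 		elif ele==2:
-- 			pass
-- 		else:
-- 			ss.append(ele)
-- 	s.append(ss)
-- 	return s
-- ===== SOURCE B (Python) =====
-- def pat2arr(pat):
--     # pass 1: split pat into segments at each 1 (no other inspection of elements)
--     segs = []
--     cur = []
--     for e in pat: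
--         if e == 1:
--             segs.append(cur)
--             cur = []
--         else:
--             cur.append(e)
--     segs.append(cur)
--     # pass 2: per segment, scan BACKWARD: stop at the first 0 seen (= last 0 of the
--     # segment), skip 2s, then restore the original order
--     out = []
--     for seg in segs:
--         kept = []
--         for e in reversed(seg):
--             if e == 0:
--                 break
--             if e != 2:
--                 kept.append(e)
--         out.append(kept[::-1])
--     return out
-- ===== Notes on version B (the rewrite author's own statement) =====
-- stated objective: alternative
-- what changed: A builds the groups in one stateful pass (0 wipes, 1 flushes, 2 skipped); B first splits the pattern into segments at the 1s and then, per segment, scans backward stopping at the last 0 while dropping 2s.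
import Mathlib
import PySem

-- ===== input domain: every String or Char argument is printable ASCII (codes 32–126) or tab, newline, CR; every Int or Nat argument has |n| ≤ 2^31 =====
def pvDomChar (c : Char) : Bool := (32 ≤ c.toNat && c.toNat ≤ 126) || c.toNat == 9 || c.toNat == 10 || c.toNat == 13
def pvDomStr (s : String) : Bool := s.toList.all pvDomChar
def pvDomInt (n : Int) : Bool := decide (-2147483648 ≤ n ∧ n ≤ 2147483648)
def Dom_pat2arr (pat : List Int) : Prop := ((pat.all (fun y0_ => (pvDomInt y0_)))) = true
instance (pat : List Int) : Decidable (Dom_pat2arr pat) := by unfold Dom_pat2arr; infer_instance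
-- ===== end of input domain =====

-- B replaces A's single stateful pass by two passes: split at 1s, then a backward
-- scan per segment (stop at the last 0, drop 2s); objective: alternative decomposition.


-- ===== PORT A =====
def pat2arr (pat : List Int) : List (List Int) :=
  let st := pat.foldl (fun (st : List (List Int) × List Int) ele =>
    if ele = 0 then (st.1, [])
    else if ele = 1 then (st.1 ++ [st.2], [])
    else if ele = 2 then st
    else (st.1, st.2 ++ [ele])) ([], [])
  st.1 ++ [st.2]

-- ===== PORT B =====
-- backward scan of a (reversed) segment: stop at 0, skip 2s
def pvGrpRev : List Int → List Int
  | [] => []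
  | e :: r => if e = 0 then [] else if e = 2 then pvGrpRev r else e :: pvGrpRev r

def pvGrp (seg : List Int) : List Int := (pvGrpRev seg.reverse).reverse

def pat2arr_alt (pat : List Int) : List (List Int) :=
  let st := pat.foldl (fun (st : List (List Int) × List Int) e =>
    if e = 1 then (st.1 ++ [st.2], []) else (st.1, st.2 ++ [e])) ([], [])
  (st.1 ++ [st.2]).map pvGrp

-- ===== PRECONDITION & SPEC =====
def Spec_pat2arr (pat : List Int) (out : List (List Int)) : Prop := out = pat2arr_alt pat
instance (pat : List Int) (out : List (List Int)) : Decidable (Spec_pat2arr pat out) := by unfold Spec_pat2arr; infer_instance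

-- ===== CLAIM (what is proved, stated in full; the proofs are below) =====
def Claim_equal_pat2arr : Prop := ∀ (pat : List Int), Dom_pat2arr pat → Spec_pat2arr pat (pat2arr pat)

-- ===== LEMMAS AND PROOFS =====

-- right-recursive characterisation of A's loop (ss = filtered current group)
def pvRA : List Int → List Int → List (List Int)
  | ss, [] => [ss]
  | ss, e :: r =>
    if e = 0 then pvRA [] r
    else if e = 1 then ss :: pvRA [] r
    else if e = 2 then pvRA ss r
    else pvRA (ss ++ [e]) r

-- right-recursive characterisation of B's split loop (ss = raw current segment)
def pvRB : List Int → List Int → List (List Int)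
  | ss, [] => [pvGrp ss]
  | ss, e :: r => if e = 1 then pvGrp ss :: pvRB [] r else pvRB (ss ++ [e]) r

lemma pvA_fold (pat : List Int) : ∀ (s : List (List Int)) (ss : List Int),
    (pat.foldl (fun (st : List (List Int) × List Int) ele =>
      if ele = 0 then (st.1, [])
      else if ele = 1 then (st.1 ++ [st.2], [])
      else if ele = 2 then st
      else (st.1, st.2 ++ [ele])) (s, ss)).1
    ++ [(pat.foldl (fun (st : List (List Int) × List Int) ele =>
      if ele = 0 then (st.1, [])
      else if ele = 1 then (st.1 ++ [st.2], [])
      else if ele = 2 then st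
      else (st.1, st.2 ++ [ele])) (s, ss)).2]
    = s ++ pvRA ss pat := by
  induction pat with
  | nil => intro s ss; simp [pvRA]
  | cons e r ih =>
    intro s ss
    simp only [List.foldl_cons, pvRA]
    by_cases h0 : e = 0
    · simp [h0, ih]
    · by_cases h1 : e = 1
      · simp [h1, ih]
      · by_cases h2 : e = 2
        · simp [h2, ih]
        · simp [h0, h1, h2, ih]

lemma pvB_fold (pat : List Int) : ∀ (s : List (List Int)) (ss : List Int),
    (((pat.foldl (fun (st : List (List Int) × List Int) e =>
      if e = 1 then (st.1 ++ [st.2], []) else (st.1, st.2 ++ [e])) (s, ss)).1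
    ++ [(pat.foldl (fun (st : List (List Int) × List Int) e =>
      if e = 1 then (st.1 ++ [st.2], []) else (st.1, st.2 ++ [e])) (s, ss)).2]).map pvGrp)
    = s.map pvGrp ++ pvRB ss pat := by
  induction pat with
  | nil => intro s ss; simp [pvRB]
  | cons e r ih =>
    intro s ss
    simp only [List.foldl_cons, pvRB]
    by_cases h1 : e = 1
    · simp [h1, ih]
    · simp [h1, ih]

lemma pvGrp_snoc_zero (ss : List Int) : pvGrp (ss ++ [0]) = [] := by
  simp [pvGrp, pvGrpRev]

lemma pvGrp_snoc_two (ss : List Int) : pvGrp (ss ++ [2]) = pvGrp ss := by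
  simp [pvGrp, pvGrpRev]

lemma pvGrp_snoc (ss : List Int) (e : Int) (h0 : e ≠ 0) (h2 : e ≠ 2) :
    pvGrp (ss ++ [e]) = pvGrp ss ++ [e] := by
  simp [pvGrp, pvGrpRev, h0, h2]

lemma pvGrp_nil : pvGrp [] = [] := rfl

lemma pvRA_eq_pvRB (pat : List Int) : ∀ ss : List Int, pvRA (pvGrp ss) pat = pvRB ss pat := by
  induction pat with
  | nil => intro ss; simp [pvRA, pvRB]
  | cons e r ih =>
    intro ss
    simp only [pvRA, pvRB]
    have ihnil : pvRA [] r = pvRB [] r := by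
      have h := ih []
      rwa [pvGrp_nil] at h
    by_cases h0 : e = 0
    · subst h0
      have h := ih (ss ++ [0])
      rw [pvGrp_snoc_zero] at h
      simpa using h
    · by_cases h1 : e = 1
      · subst h1
        simp [ihnil]
      · by_cases h2 : e = 2
        · subst h2
          have h := ih (ss ++ [2])
          rw [pvGrp_snoc_two] at h
          simpa [h0] using h
        · have h := ih (ss ++ [e])
          rw [pvGrp_snoc ss e h0 h2] at h
          simp [h0, h1, h2, h]

-- ===== VERDICT (by name: the statement is the Claim_ definition above) =====
theorem pat2arr_spec : Claim_equal_pat2arr := by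
  intro pat _
  unfold Spec_pat2arr pat2arr pat2arr_alt
  simp only [pvA_fold, pvB_fold]
  have h := pvRA_eq_pvRB pat []
  rw [pvGrp_nil] at h
  simpa using h
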